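-- pv_equiv track=rewrite | github.com/gitbobeek/algorithms | sorts.py | hibbard_increment
-- ===== SOURCE A (Python) =====
-- def hibbard_increment(n):
--     increments = []
--     k = 1
--     while True:
--         increment = (2 ** k) - 1
--         if increment >= n:
--             break
--         increments.append(increment)
--         k += 1
--     return increments
-- ===== SOURCE B (Python) =====
-- def hibbard_increment(n):
--     if n < 1:
--         return []
--     m = n.bit_length() - 1  # largest k with 2**k <= n, i.e. 2**k - 1 < n
--     return [(1 << k) - 1 for k in range(1, m + 1)]
-- ===== Notes on version B (the rewrite author's own statement) =====
-- stated objective: idiomatic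
-- what changed: Replaces the unbounded while-True/break loop that tests the bound at every step with a closed-form term count via bit_length and a direct comprehension over range.
import Mathlib
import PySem

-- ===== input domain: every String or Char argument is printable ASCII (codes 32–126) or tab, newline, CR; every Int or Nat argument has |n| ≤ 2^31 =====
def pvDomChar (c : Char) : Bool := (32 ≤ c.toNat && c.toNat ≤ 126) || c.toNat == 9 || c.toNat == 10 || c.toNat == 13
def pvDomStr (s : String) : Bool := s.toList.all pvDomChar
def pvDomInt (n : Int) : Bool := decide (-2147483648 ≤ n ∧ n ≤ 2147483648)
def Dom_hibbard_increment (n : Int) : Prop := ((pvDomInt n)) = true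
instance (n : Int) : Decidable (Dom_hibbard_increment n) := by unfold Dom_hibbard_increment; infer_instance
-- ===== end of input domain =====

-- B replaces A's while-True/break loop by a closed-form term count (bit_length) and a direct comprehension; objective: idiomatic.

-- ===== PORT A =====
-- the while-True loop: at step k compute 2^k - 1, stop when it reaches n, else append and continue
def hibbard_loop (n : Int) (k : Nat) (acc : List Int) : List Int :=
  let increment : Int := 2 ^ k - 1
  if _h : increment ≥ n then acc
  else hibbard_loop n (k + 1) (acc ++ [increment])
termination_by n.toNat - k
decreasing_by
  have hk : (k : Int) < 2 ^ k := by exact_mod_cast Nat.lt_two_pow_self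
  have : (k : Int) < n := by
    have : (2 : Int) ^ k - 1 < n := by omega
    omega
  omega

def hibbard_increment (n : Int) : List Int := hibbard_loop n 1 []

-- ===== PORT B =====
def hibbard_increment_alt (n : Int) : List Int :=
  if n < 1 then []
  else
    let m : Nat := n.toNat.size - 1  -- Python n.bit_length() - 1 for n ≥ 1
    (List.range' 1 m).map (fun k => (2 : Int) ^ k - 1)

-- ===== PRECONDITION & SPEC =====
def Spec_hibbard_increment (n : Int) (out : List Int) : Prop := out = hibbard_increment_alt n
instance (n : Int) (out : List Int) : Decidable (Spec_hibbard_increment n out) := by unfold Spec_hibbard_increment; infer_instance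

-- ===== CLAIM (what is proved, stated in full; the proofs are below) =====
def Claim_equal_hibbard_increment : Prop := ∀ (n : Int), Dom_hibbard_increment n → Spec_hibbard_increment n (hibbard_increment n)

-- ===== LEMMAS AND PROOFS =====

theorem hibbard_loop_stop (n : Int) (k : Nat) (acc : List Int)
    (h : (2 : Int) ^ k - 1 ≥ n) : hibbard_loop n k acc = acc := by
  rw [hibbard_loop]; simp [h]

theorem hibbard_loop_step (n : Int) (k : Nat) (acc : List Int)
    (h : ¬ (2 : Int) ^ k - 1 ≥ n) :
    hibbard_loop n k acc = hibbard_loop n (k + 1) (acc ++ [(2 : Int) ^ k - 1]) := by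
  rw [hibbard_loop]; simp [h]

theorem hibbard_loop_range (n : Int) (j k : Nat) (acc : List Int)
    (hstop : (2 : Int) ^ (k + j) - 1 ≥ n)
    (hgo : ∀ i, i < j → (2 : Int) ^ (k + i) - 1 < n) :
    hibbard_loop n k acc = acc ++ (List.range' k j).map (fun i => (2 : Int) ^ i - 1) := by
  induction j generalizing k acc with
  | zero => simpa using hibbard_loop_stop n k acc (by simpa using hstop)
  | succ j ih =>
    have h0 : (2 : Int) ^ k - 1 < n := by simpa using hgo 0 (Nat.succ_pos j)
    rw [hibbard_loop_step n k acc (by omega)]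
    rw [ih (k + 1) _ (by rw [show k + 1 + j = k + (j + 1) by omega]; exact hstop)
      (fun i hi => by rw [show k + 1 + i = k + (i + 1) by omega]; exact hgo (i + 1) (by omega))]
    simp [List.range'_succ]

theorem hibbard_increment_eq (n : Int) : hibbard_increment n = hibbard_increment_alt n := by
  unfold hibbard_increment hibbard_increment_alt
  by_cases hn : n < 1
  · simp only [if_pos hn]
    exact hibbard_loop_stop n 1 [] (by norm_num; omega)
  · simp only [if_neg hn]
    rw [not_lt] at hn
    set m := n.toNat.size - 1 with hm
    have hsz : 1 ≤ n.toNat.size := Nat.size_pos.mpr (by omega)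
    have hn' : (n.toNat : Int) = n := Int.toNat_of_nonneg (by omega)
    apply hibbard_loop_range
    · -- 2 ^ (1 + m) - 1 ≥ n  since n < 2 ^ size
      have h1 : n.toNat < 2 ^ n.toNat.size := Nat.lt_size_self _
      have h2 : 1 + m = n.toNat.size := by omega
      rw [h2]
      have : (n.toNat : Int) < (2 : Int) ^ n.toNat.size := by exact_mod_cast h1
      omega
    · intro i hi
      have h3 : i + 1 < n.toNat.size := by omega
      have h4 : 2 ^ (i + 1) ≤ n.toNat := Nat.lt_size.mp h3
      have : ((2 : Int)) ^ (i + 1) ≤ (n.toNat : Int) := by exact_mod_cast h4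
      rw [show 1 + i = i + 1 by omega]
      omega

-- ===== VERDICT (by name: the statement is the Claim_ definition above) =====
theorem hibbard_increment_spec : Claim_equal_hibbard_increment := by
  intro n _
  exact hibbard_increment_eq n
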